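-- pv_equiv track=rewrite | github.com/85406043/Exercicios-Python-Curso-em-Video | ChatBot/Luna/luna_terminal.py | detect_silence_request
-- ===== SOURCE A (Python) =====
-- def detect_silence_request(text):
--     """Detecta se usuário pediu para Luna ficar quieta"""
--     text_lower = text.lower()
--
--     silence_phrases = [
--         "fica quieta", "fique quieta", "ficar quieta",
--         "fica calada", "fique calada", "ficar calada",
--         "para de falar", "pare de falar",
--         "deixa eu quieto", "me deixa quieto",
--         "depois conversamos", "depois a gente conversa",
--         "agora não", "não agora",
--         "tchau", "até depois", "até mais",
--         "preciso de silêncio", "quero silêncio",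
--         "não quero conversar", "não quero falar"
--     ]
--
--     for phrase in silence_phrases:
--         if phrase in text_lower:
--             return True
--
--     return False
-- ===== SOURCE B (Python) =====
-- _SILENCE_PHRASES = (
--     "fica quieta", "fique quieta", "ficar quieta",
--     "fica calada", "fique calada", "ficar calada",
--     "para de falar", "pare de falar",
--     "deixa eu quieto", "me deixa quieto",
--     "depois conversamos", "depois a gente conversa",
--     "agora não", "não agora",
--     "tchau", "até depois", "até mais",
--     "preciso de silêncio", "quero silêncio",
--     "não quero conversar", "não quero falar",
-- )
--
--
-- def detect_silence_request(text):
--     """One left-to-right scan: at each position, test whether any phrase starts there."""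
--     t = text.lower()
--     for i in range(len(t)):
--         for p in _SILENCE_PHRASES:
--             if t.startswith(p, i):
--                 return True
--     return False
-- ===== Notes on version B (the rewrite author's own statement) =====
-- stated objective: alternative
-- what changed: Replaced the phrase-major loop of ~21 full substring searches by a single position-major scan of the lowered text that tests at each index whether any phrase starts there.
import Mathlib
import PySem

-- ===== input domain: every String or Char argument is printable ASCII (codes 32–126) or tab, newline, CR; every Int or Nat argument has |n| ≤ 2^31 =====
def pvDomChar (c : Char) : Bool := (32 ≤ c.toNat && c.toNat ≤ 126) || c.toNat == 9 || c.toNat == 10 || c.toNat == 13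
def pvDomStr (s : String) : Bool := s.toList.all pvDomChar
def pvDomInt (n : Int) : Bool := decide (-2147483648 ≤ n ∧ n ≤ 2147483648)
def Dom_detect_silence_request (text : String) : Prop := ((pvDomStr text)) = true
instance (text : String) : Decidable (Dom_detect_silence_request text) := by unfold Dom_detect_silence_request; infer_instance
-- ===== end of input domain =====

-- B replaces A's phrase-major loop of sequential substring searches by one position-major
-- scan of the lowered text, testing at each index whether any phrase starts there (alternative).

-- ===== PORT A =====
-- the silence-phrase list (shared data of both ports)
def pvPhrases : List String :=
  ["fica quieta", "fique quieta", "ficar quieta",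
   "fica calada", "fique calada", "ficar calada",
   "para de falar", "pare de falar",
   "deixa eu quieto", "me deixa quieto",
   "depois conversamos", "depois a gente conversa",
   "agora não", "não agora",
   "tchau", "até depois", "até mais",
   "preciso de silêncio", "quero silêncio",
   "não quero conversar", "não quero falar"]

-- the 'for phrase in silence_phrases: if phrase in text_lower: return True' loop
def pvLoopA (phrases : List String) (tl : String) : Bool :=
  match phrases with
  | [] => false
  | p :: rest => if PySem.Str.isIn p tl then true else pvLoopA rest tl

def detect_silence_request (text : String) : Bool :=
  pvLoopA pvPhrases (PySem.Str.lower text)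

-- ===== PORT B =====  (B scans the same phrase list pvPhrases)
-- the position scan: 'for i in range(len(t)): if any phrase starts at i: return True'
def pvScanB (cs : List Char) : Bool :=
  match cs with
  | [] => false
  | c :: t =>
    if pvPhrases.any (fun p => p.toList.isPrefixOf (c :: t)) then true
    else pvScanB t

def detect_silence_request_alt (text : String) : Bool :=
  pvScanB (PySem.Str.lower text).toList

-- ===== PRECONDITION & SPEC =====
def Spec_detect_silence_request (text : String) (out : Bool) : Prop := out = detect_silence_request_alt text
instance (text : String) (out : Bool) : Decidable (Spec_detect_silence_request text out) := by unfold Spec_detect_silence_request; infer_instance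

-- ===== CLAIM (what is proved, stated in full; the proofs are below) =====
def Claim_equal_detect_silence_request : Prop := ∀ (text : String), Dom_detect_silence_request text → Spec_detect_silence_request text (detect_silence_request text)

-- ===== LEMMAS AND PROOFS =====

theorem pvLoopA_iff (ps : List String) (tl : String) :
    pvLoopA ps tl = true ↔ ∃ p ∈ ps, p.toList <:+: tl.toList := by
  induction ps with
  | nil => simp [pvLoopA]
  | cons p rest ih =>
    simp only [pvLoopA]
    split_ifs with h
    · simp only [true_iff]
      exact ⟨p, List.mem_cons_self .., (PySem.Str.isIn_iff_infix p tl).mp h⟩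
    · rw [ih]
      constructor
      · rintro ⟨q, hq, hinf⟩; exact ⟨q, List.mem_cons_of_mem _ hq, hinf⟩
      · rintro ⟨q, hq, hinf⟩
        rcases List.mem_cons.mp hq with rfl | hq'
        · exact absurd ((PySem.Str.isIn_iff_infix q tl).mpr hinf) (by simpa using h)
        · exact ⟨q, hq', hinf⟩

theorem pvScanB_iff (cs : List Char) :
    pvScanB cs = true ↔ ∃ p ∈ pvPhrases, p.toList <:+: cs := by
  induction cs with
  | nil =>
    simp only [pvScanB, List.infix_nil]
    constructor
    · intro h; exact absurd h (by decide)
    · rintro ⟨p, hp, hnil⟩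
      have : ∀ p ∈ pvPhrases, p.toList ≠ [] := by decide
      exact absurd hnil (this p hp)
  | cons c t ih =>
    simp only [pvScanB]
    split_ifs with h
    · simp only [true_iff]
      rcases List.any_eq_true.mp h with ⟨p, hp, hpre⟩
      exact ⟨p, hp, (List.isPrefixOf_iff_prefix.mp hpre).isInfix⟩
    · rw [ih]
      constructor
      · rintro ⟨p, hp, hinf⟩; exact ⟨p, hp, hinf.trans ((List.suffix_cons c t).isInfix)⟩
      · rintro ⟨p, hp, hinf⟩
        rcases (List.infix_cons_iff).mp hinf with hpre | hinf'
        · exact absurd (List.any_eq_true.mpr ⟨p, hp, List.isPrefixOf_iff_prefix.mpr hpre⟩) h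
        · exact ⟨p, hp, hinf'⟩

-- ===== VERDICT (by name: the statement is the Claim_ definition above) =====
theorem detect_silence_request_spec : Claim_equal_detect_silence_request := by
  intro text _
  unfold Spec_detect_silence_request detect_silence_request detect_silence_request_alt
  rw [Bool.eq_iff_iff, pvLoopA_iff, pvScanB_iff]
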